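-- pv_equiv track=rewrite | github.com/bohodays/Algorithm_problem_solving | 프로그래머스/1/133502. 햄버거 만들기/햄버거 만들기.py | solution
-- ===== SOURCE A (Python) =====
-- def solution(ingredient):
--     answer = 0
--
--     stack = []
--     for item in ingredient:
--         if len(stack) < 3:
--             stack.append(item)
--         else:
--             if item == 1:
--                 if stack[-1] == 3 and stack[-2] == 2 and stack[-3] == 1:
--                     stack.pop()
--                     stack.pop()
--                     stack.pop()
--                     answer += 1
--                 else:
--                     stack.append(item)
--             else:
--                 stack.append(item)
--
--     return answer
-- ===== SOURCE B (Python) =====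
-- def solution(ingredient):
--     lst = list(ingredient)
--     answer = 0
--     while True:
--         found = False
--         for i in range(len(lst) - 3):
--             if lst[i:i + 4] == [1, 2, 3, 1]:
--                 del lst[i:i + 4]
--                 answer += 1
--                 found = True
--                 break
--         if not found:
--             return answer
-- ===== Notes on version B (the rewrite author's own statement) =====
-- stated objective: alternative
-- what changed: Replaces the single-pass streaming stack with repeated leftmost search-and-delete of the factor [1,2,3,1] on a copy of the list, restarting the scan from the front after each deletion.
import Mathlib
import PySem

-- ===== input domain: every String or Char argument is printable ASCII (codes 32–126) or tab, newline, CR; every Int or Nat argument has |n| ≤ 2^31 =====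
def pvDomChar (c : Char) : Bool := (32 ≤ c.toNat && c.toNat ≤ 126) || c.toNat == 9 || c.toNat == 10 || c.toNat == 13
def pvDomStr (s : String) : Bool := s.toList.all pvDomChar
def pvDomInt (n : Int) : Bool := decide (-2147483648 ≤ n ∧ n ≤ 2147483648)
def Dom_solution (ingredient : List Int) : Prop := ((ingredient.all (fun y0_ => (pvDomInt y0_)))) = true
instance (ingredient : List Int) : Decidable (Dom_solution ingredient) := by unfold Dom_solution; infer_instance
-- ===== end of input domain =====

-- B replaces A's single-pass streaming stack by repeated leftmost search-and-delete of the
-- factor [1,2,3,1] (alternative algorithm, not faster); return values proved equal on Dom.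


-- ===== PORT A =====
-- one iteration of A's for-loop: state = (answer, stack)
def stepA (st : Int × List Int) (item : Int) : Int × List Int :=
  if st.2.length < 3 then (st.1, st.2 ++ [item])
  else if item = 1 then
    if PySem.List.pyGet? st.2 (-1) = some 3 ∧ PySem.List.pyGet? st.2 (-2) = some 2 ∧
        PySem.List.pyGet? st.2 (-3) = some 1 then
      (st.1 + 1, st.2.dropLast.dropLast.dropLast)
    else (st.1, st.2 ++ [item])
  else (st.1, st.2 ++ [item])

def solution (ingredient : List Int) : Int :=
  (ingredient.foldl stepA (0, [])).1

-- ===== PORT B =====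
-- Source B's inner for-scan: find the leftmost occurrence of [1,2,3,1] and delete it (none = not found)
def delFirst : List Int → Option (List Int)
  | [] => none
  | x :: xs =>
    if x = 1 ∧ xs.take 3 = [2, 3, 1] then some (xs.drop 3)
    else (delFirst xs).map (x :: ·)

theorem delFirst_length : ∀ {w w' : List Int}, delFirst w = some w' → w'.length < w.length := by
  intro w
  induction w with
  | nil => intro w' h; simp [delFirst] at h
  | cons x xs ih =>
    intro w' h
    simp only [delFirst] at h
    split at h
    · injection h with h
      subst h
      simp only [List.length_drop, List.length_cons]
      omega
    · cases hy : delFirst xs with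
      | none => rw [hy] at h; simp at h
      | some y =>
        rw [hy] at h
        simp at h
        subst h
        have := ih hy
        simp; omega

-- Source B's outer while-loop: repeat until no occurrence is found, counting deletions
def bLoop (w : List Int) : Int :=
  match h : delFirst w with
  | some w' => bLoop w' + 1
  | none => 0
termination_by w.length
decreasing_by exact delFirst_length h

def solution_alt (ingredient : List Int) : Int := bLoop ingredient

-- ===== PRECONDITION & SPEC =====
def Spec_solution (ingredient : List Int) (out : Int) : Prop := out = solution_alt ingredient
instance (ingredient : List Int) (out : Int) : Decidable (Spec_solution ingredient out) := by unfold Spec_solution; infer_instance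

-- ===== CLAIM (what is proved, stated in full; the proofs are below) =====
def Claim_equal_solution : Prop := ∀ (ingredient : List Int), Dom_solution ingredient → Spec_solution ingredient (solution ingredient)

-- ===== LEMMAS AND PROOFS =====

-- proof-side model of A's loop with the stack kept REVERSED (head = top of stack)
def runR : List Int → List Int → Int × List Int
  | r, [] => (0, r)
  | r, x :: xs =>
    if x = 1 ∧ r.take 3 = [3, 2, 1] then
      ((runR (r.drop 3) xs).1 + 1, (runR (r.drop 3) xs).2)
    else runR (x :: r) xs

def HasF (w : List Int) : Prop := ∃ p q, w = p ++ [1, 2, 3, 1] ++ q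

theorem take3_eq_iff (r : List Int) (a b c : Int) :
    r.take 3 = [a, b, c] ↔ ∃ t, r = a :: b :: c :: t := by
  rcases r with _ | ⟨x, _ | ⟨y, _ | ⟨z, t⟩⟩⟩ <;> simp

theorem runR_append (u : List Int) : ∀ (v r : List Int),
    runR r (u ++ v) = ((runR r u).1 + (runR (runR r u).2 v).1, (runR (runR r u).2 v).2) := by
  induction u with
  | nil => intro v r; simp [runR]
  | cons x xs ih =>
    intro v r
    simp only [List.cons_append, runR]
    split
    · rw [ih]; simp; ring
    · rw [ih]

theorem hasF_append_singleton {p : List Int} {x : Int} (h : HasF p) : HasF (p ++ [x]) := by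
  obtain ⟨a, b, rfl⟩ := h
  exact ⟨a, b ++ [x], by simp⟩

theorem free_run (p : List Int) (h : ¬ HasF p) : runR [] p = (0, p.reverse) := by
  induction p using List.reverseRecOn with
  | nil => simp [runR]
  | append_singleton p₀ x ih =>
    have h₀ : ¬ HasF p₀ := fun hf => h (hasF_append_singleton hf)
    rw [runR_append, ih h₀]
    simp only [runR]
    split
    · rename_i hc
      obtain ⟨hx, ht⟩ := hc
      obtain ⟨t, hr⟩ := (take3_eq_iff _ 3 2 1).mp ht
      exfalso
      apply h
      refine ⟨t.reverse, [], ?_⟩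
      have : p₀ = t.reverse ++ [1, 2, 3] := by
        have := congrArg List.reverse hr; simpa using this
      subst hx; rw [this]; simp
    · simp

-- characterisation of B's leftmost deletion: the prefix p contains no occurrence and does not end in [1,2,3]
theorem delFirst_some_spec : ∀ {w w' : List Int}, delFirst w = some w' →
    ∃ p q, w = p ++ [1, 2, 3, 1] ++ q ∧ w' = p ++ q ∧ ¬ HasF p ∧ ∀ t, p ≠ t ++ [1, 2, 3] := by
  intro w
  induction w with
  | nil => intro w' h; simp [delFirst] at h
  | cons x xs ih =>
    intro w' h
    simp only [delFirst] at h
    split at h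
    · rename_i hc
      obtain ⟨hx, ht⟩ := hc
      obtain ⟨t, rfl⟩ := (take3_eq_iff _ 2 3 1).mp ht
      refine ⟨[], t, by simp [hx], by simpa using h.symm, ?_, by simp⟩
      rintro ⟨a, b, hab⟩
      simp at hab
    · rename_i hc
      cases hy : delFirst xs with
      | none => rw [hy] at h; simp at h
      | some y =>
        rw [hy] at h; simp at h; subst h
        obtain ⟨p, q, hw, hy', hfree, hend⟩ := ih hy
        refine ⟨x :: p, q, by simp [hw], by simp [hy'], ?_, ?_⟩
        · rintro ⟨a, b, hab⟩
          rcases a with _ | ⟨a0, a'⟩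
          · simp at hab
            obtain ⟨hx1, hp⟩ := hab
            exact hc ⟨hx1, by simp [hw, hp, List.take]⟩
          · simp at hab
            exact hfree ⟨a', b, by simpa using hab.2⟩
        · intro t hxt
          rcases t with _ | ⟨t0, t'⟩
          · simp at hxt
            obtain ⟨hx1, hp⟩ := hxt
            exact hc ⟨hx1, by simp [hw, hp, List.take]⟩
          · simp at hxt
            exact hend t' hxt.2

theorem delFirst_none_notF : ∀ {w : List Int}, delFirst w = none → ¬ HasF w := by
  intro w
  induction w with
  | nil => intro _ hf; obtain ⟨p, q, h⟩ := hf; simp at h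
  | cons x xs ih =>
    intro h hf
    simp only [delFirst] at h
    split at h
    · simp at h
    · rename_i hc
      obtain ⟨p, q, hw⟩ := hf
      rcases p with _ | ⟨p0, p'⟩
      · simp at hw
        exact hc ⟨hw.1, by simp [hw.2, List.take]⟩
      · simp at hw
        cases hy : delFirst xs with
        | none => exact ih hy ⟨p', q, by simpa using hw.2⟩
        | some y => rw [hy] at h; simp at h

-- A's step agrees with runR's step (stack reversed)
theorem pyGet3 (t : List Int) (c b a : Int) :
    PySem.List.pyGet? (t ++ [c, b, a]) (-1) = some a ∧
    PySem.List.pyGet? (t ++ [c, b, a]) (-2) = some b ∧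
    PySem.List.pyGet? (t ++ [c, b, a]) (-3) = some c := by
  refine ⟨?_, ?_, ?_⟩
  · rw [PySem.List.pyGet?_neg_one]; simp
  · rw [PySem.List.pyGet?_neg_ofNat (t ++ [c, b, a]) 2 (by omega) (by simp)]; simp
  · rw [PySem.List.pyGet?_neg_ofNat (t ++ [c, b, a]) 3 (by omega) (by simp)]; simp

theorem stepA_eq (a : Int) (s : List Int) (x : Int) :
    stepA (a, s) x =
      if x = 1 ∧ s.reverse.take 3 = [3, 2, 1] then (a + 1, (s.reverse.drop 3).reverse)
      else (a, s ++ [x]) := by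
  split
  · rename_i hc
    obtain ⟨hx, ht⟩ := hc
    obtain ⟨t, hr⟩ := (take3_eq_iff _ 3 2 1).mp ht
    have hs : s = t.reverse ++ [1, 2, 3] := by
      have := congrArg List.reverse hr; simpa using this
    subst hx
    rw [hs]
    have hRHS : (List.drop 3 (t.reverse ++ [(1:Int), 2, 3]).reverse).reverse = t.reverse := by
      simp
    rw [hRHS]
    simp only [stepA]
    have hlen : ¬ ((t.reverse ++ [(1:Int), 2, 3]).length < 3) := by simp
    rw [if_neg hlen, if_pos trivial, if_pos (pyGet3 t.reverse 1 2 3)]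
    have hdl : (t.reverse ++ [(1:Int), 2, 3]).dropLast.dropLast.dropLast = t.reverse := by
      rw [show t.reverse ++ [(1:Int), 2, 3] = ((t.reverse ++ [1]) ++ [2]) ++ [3] by simp]
      rw [List.dropLast_concat, List.dropLast_concat, List.dropLast_concat]
    rw [hdl]
  · rename_i hc
    simp only [stepA]
    split
    · rfl
    · rename_i hlen
      split
      · rename_i hx1
        split
        · rename_i hget
          exfalso
          apply hc
          refine ⟨hx1, ?_⟩
          have hex : ∃ a₀ b₀ c₀ t, s.reverse = a₀ :: b₀ :: c₀ :: t := by
            rcases hr : s.reverse with _ | ⟨a₀, _ | ⟨b₀, _ | ⟨c₀, t⟩⟩⟩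
            · exfalso; have hl := congrArg List.length hr; simp at hl hlen
              simp [hl] at hlen
            · exfalso; have hl := congrArg List.length hr; simp at hl hlen; omega
            · exfalso; have hl := congrArg List.length hr; simp at hl hlen; omega
            · exact ⟨a₀, b₀, c₀, t, rfl⟩
          obtain ⟨a₀, b₀, c₀, t, hr⟩ := hex
          have hs : s = t.reverse ++ [c₀, b₀, a₀] := by
            have := congrArg List.reverse hr; simpa using this
          obtain ⟨g1, g2, g3⟩ := hget
          rw [hs] at g1 g2 g3
          obtain ⟨e1, e2, e3⟩ := pyGet3 t.reverse c₀ b₀ a₀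
          rw [e1] at g1; rw [e2] at g2; rw [e3] at g3
          injection g1 with g1; injection g2 with g2; injection g3 with g3
          rw [hr]
          simp [List.take, g1, g2, g3]
        · rfl
      · rfl

theorem bridge (w : List Int) : ∀ (a : Int) (s : List Int),
    List.foldl stepA (a, s) w = (a + (runR s.reverse w).1, ((runR s.reverse w).2).reverse) := by
  induction w with
  | nil => intro a s; simp [runR]
  | cons x xs ih =>
    intro a s
    rw [List.foldl_cons, stepA_eq]
    simp only [runR]
    split
    · rename_i hc
      rw [ih]
      simp
      ring
    · rename_i hc
      rw [ih]
      have : (s ++ [x]).reverse = x :: s.reverse := by simp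
      rw [this]

theorem bLoop_none {w : List Int} (h : delFirst w = none) : bLoop w = 0 := by
  rw [bLoop]; split <;> simp_all

theorem bLoop_some {w w' : List Int} (h : delFirst w = some w') : bLoop w = bLoop w' + 1 := by
  rw [bLoop]; split <;> simp_all

theorem key : ∀ (n : Nat) (w : List Int), w.length ≤ n → bLoop w = (runR [] w).1 := by
  intro n
  induction n with
  | zero =>
    intro w hw
    have hnil : w = [] := by cases w <;> simp_all
    subst hnil
    rw [bLoop_none (by simp [delFirst])]
    simp [runR]
  | succ m ih =>
    intro w hw
    cases h : delFirst w with
    | none =>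
      rw [bLoop_none h, free_run w (delFirst_none_notF h)]
    | some w' =>
      obtain ⟨p, q, hw', hw'', hfree, hend⟩ := delFirst_some_spec h
      have hlt := delFirst_length h
      have hrun : (runR [] w).1 = (runR [] (p ++ q)).1 + 1 := by
        rw [hw']
        rw [show p ++ [(1:Int), 2, 3, 1] ++ q = p ++ ([1, 2, 3, 1] ++ q) by simp]
        rw [runR_append p ([1, 2, 3, 1] ++ q) [], runR_append p q []]
        rw [free_run p hfree]
        rw [show [(1:Int), 2, 3, 1] ++ q = 1 :: 2 :: 3 :: 1 :: q from by simp]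
        have hA : p.reverse.take 3 ≠ [3, 2, 1] := by
          intro ht
          obtain ⟨t, hr⟩ := (take3_eq_iff _ 3 2 1).mp ht
          apply hend t.reverse
          have := congrArg List.reverse hr; simpa using this
        simp [runR, hA]
      rw [bLoop_some h, ih w' (by omega), hw'', hrun]

-- ===== VERDICT (by name: the statement is the Claim_ definition above) =====
theorem solution_spec : Claim_equal_solution := by
  intro w _
  unfold Spec_solution solution solution_alt
  rw [bridge w 0 []]
  simp
  rw [key w.length w le_rfl]
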